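-- pv_equiv track=rewrite | github.com/Monkey0-9/alpha-juinor | data/universe_scanner.py | get_sector_allocation
-- ===== SOURCE A (Python) =====
-- from typing import Dict, List, Optional, Set
--
-- def get_sector_allocation(
--
--     symbols: List[str],
--     sectors: Dict[str, str]
-- ) -> Dict[str, List[str]]:
--     """Group symbols by sector."""
--     allocation = {}
--
--     for symbol in symbols:
--         sector = sectors.get(symbol, "Unknown")
--         if sector not in allocation:
--             allocation[sector] = []
--         allocation[sector].append(symbol)
--
--     return allocation
-- ===== SOURCE B (Python) =====
-- def get_sector_allocation(symbols, sectors):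
--     """Group symbols by sector: tag each symbol with its sector, take the
--     first-encounter sector order, then build each group by one filtering pass."""
--     tagged = [(symbol, sectors.get(symbol, "Unknown")) for symbol in symbols]
--     order = list(dict.fromkeys(sector for _, sector in tagged))
--     return {sector: [symbol for symbol, s in tagged if s == sector] for sector in order}
-- ===== Notes on version B (the rewrite author's own statement) =====
-- stated objective: alternative
-- what changed: Replaces A's incremental dict-insert/append loop with a three-stage pipeline: tag each symbol with its sector, dedup the sector tags in first-encounter order, then build each group by a filtering pass per sector.
import Mathlib
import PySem

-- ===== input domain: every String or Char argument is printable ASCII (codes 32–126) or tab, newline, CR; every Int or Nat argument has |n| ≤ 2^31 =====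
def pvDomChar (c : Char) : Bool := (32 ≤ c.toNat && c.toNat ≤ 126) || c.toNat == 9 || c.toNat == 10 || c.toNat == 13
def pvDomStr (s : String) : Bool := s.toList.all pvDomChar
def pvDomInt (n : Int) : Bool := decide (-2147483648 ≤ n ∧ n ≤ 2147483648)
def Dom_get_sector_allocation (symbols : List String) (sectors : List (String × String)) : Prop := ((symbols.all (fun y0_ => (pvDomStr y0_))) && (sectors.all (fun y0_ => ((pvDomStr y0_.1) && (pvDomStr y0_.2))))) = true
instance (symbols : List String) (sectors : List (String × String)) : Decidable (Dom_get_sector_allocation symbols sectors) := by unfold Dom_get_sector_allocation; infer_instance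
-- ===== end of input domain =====

-- B groups by one tag-dedup-filter pass instead of A's incremental dict-insert loop; objective: alternative decomposition, same result.

-- ===== PORT A =====
-- A: incremental loop — for each symbol, look up its sector, create the bucket on first sight, append the symbol.
def get_sector_allocation (symbols : List String) (sectors : List (String × String)) : List (String × List String) :=
  (symbols.foldl
    (fun allocation symbol =>
      let sector := (PySem.Dict.mk sectors).getD symbol "Unknown"
      let allocation := if allocation.contains sector then allocation else allocation.insert sector []
      allocation.modify sector [] (fun l => l ++ [symbol]))
    PySem.Dict.empty).items

-- ===== PORT B =====
-- B: tag each symbol with its sector, dedup the sector tags in first-encounter order, build each group by filtering.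
def get_sector_allocation_alt (symbols : List String) (sectors : List (String × String)) : List (String × List String) :=
  let tagged := symbols.map (fun symbol => (symbol, (PySem.Dict.mk sectors).getD symbol "Unknown"))
  let order := PySem.List.dedup (tagged.map (fun p => p.2))
  order.map (fun sector => (sector, (tagged.filter (fun p => p.2 == sector)).map (fun p => p.1)))

-- ===== PRECONDITION & SPEC =====
def Spec_get_sector_allocation (symbols : List String) (sectors : List (String × String)) (out : List (String × List String)) : Prop := out = get_sector_allocation_alt symbols sectors
instance (symbols : List String) (sectors : List (String × String)) (out : List (String × List String)) : Decidable (Spec_get_sector_allocation symbols sectors out) := by unfold Spec_get_sector_allocation; infer_instance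

-- ===== CLAIM (what is proved, stated in full; the proofs are below) =====
def Claim_equal_get_sector_allocation : Prop := ∀ (symbols : List String) (sectors : List (String × String)), Dom_get_sector_allocation symbols sectors → Spec_get_sector_allocation symbols sectors (get_sector_allocation symbols sectors)

-- ===== LEMMAS AND PROOFS =====

-- A's "create the bucket, then append" step is a single Python-dict modify.
theorem pv_step_eq_modify (d : PySem.Dict String (List String)) (k x : String) :
    ((if d.contains k then d else d.insert k []).modify k [] (fun l => l ++ [x]))
      = d.modify k [] (fun l => l ++ [x]) := by
  by_cases h : d.contains k
  · simp [h]
  · simp [h, PySem.Dict.modify, PySem.Dict.insert_insert_self,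
      PySem.Dict.getD_insert_self, PySem.Dict.getD_of_not_contains d ([] : List String) (by simpa using h)]

-- filtering the (symbol, sector) tags by sector and projecting either side gives the same symbol list
theorem pv_filter_tag (symbols : List String) (key : String → String) (k : String) :
    ((symbols.map (fun s => (s, key s))).filter (fun p => p.2 == k)).map (fun p => p.1)
      = ((symbols.map (fun s => (key s, s))).filter (fun p => p.1 == k)).map (fun p => p.2) := by
  simp [List.filter_map, Function.comp_def]

-- ===== VERDICT (by name: the statement is the Claim_ definition above) =====
theorem get_sector_allocation_spec : Claim_equal_get_sector_allocation := by
  intro symbols sectors _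
  show get_sector_allocation symbols sectors = get_sector_allocation_alt symbols sectors
  unfold get_sector_allocation get_sector_allocation_alt
  set key : String → String := fun s => (PySem.Dict.mk sectors).getD s "Unknown" with hkey
  simp only [pv_step_eq_modify]
  have hfold :
      (symbols.foldl (fun d s => d.modify (key s) [] (fun l => l ++ [s])) PySem.Dict.empty)
        = ((symbols.map (fun s => (key s, s))).foldl
            (fun d p => d.modify p.1 [] (fun l => l ++ [p.2])) PySem.Dict.empty) := by
    rw [List.foldl_map]
  have hnd : (symbols.foldl (fun d s => d.modify (key s) [] (fun l => l ++ [s]))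
      PySem.Dict.empty).keys.Nodup :=
    PySem.Dict.nodup_keys_foldl_modify_key symbols key [] (fun _ s l => l ++ [s]) _
      PySem.Dict.nodup_keys_empty
  rw [PySem.Dict.items_eq_map_keys _ hnd []]
  rw [PySem.Dict.keys_foldl_modify_key symbols key [] (fun _ s l => l ++ [s])]
  simp only [List.map_map, Function.comp_def, PySem.List.dedup_eq_ofList]
  have horder : PySem.Set.update (PySem.Dict.empty : PySem.Dict String (List String)).keys
      (symbols.map key) = PySem.Set.ofList (symbols.map key) := by
    simp [PySem.Set.update, PySem.Set.ofList, PySem.Dict.keys_empty, PySem.Set.empty]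
  rw [horder]
  apply List.map_congr_left
  intro k _
  rw [hfold, PySem.Dict.getD_foldl_modify_append, pv_filter_tag symbols key k]
  simp [PySem.Dict.getD_empty]
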